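-- pv_equiv track=rewrite | github.com/rzeta-10/COA | Hamming Project/simulation.py | reconstruct_message
-- ===== SOURCE A (Python) =====
-- def reconstruct_message(decoded_blocks, block_size):
--     final_message = ''
--     max_block_length = max(len(block) for block in decoded_blocks)
--     for i in range(max_block_length):
--         for j in range(block_size):
--             if i < len(decoded_blocks[j]):
--                 final_message += str(decoded_blocks[j][i])
--     return final_message
-- ===== SOURCE B (Python) =====
-- def reconstruct_message(decoded_blocks, block_size):
--     blocks = decoded_blocks[:block_size] if block_size > 0 else []
--     out = []
--     while any(blocks):
--         out.extend(str(b[0]) for b in blocks if b)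
--         blocks = [b[1:] for b in blocks]
--     return ''.join(out)
-- ===== Notes on version B (the rewrite author's own statement) =====
-- stated objective: alternative
-- what changed: Replaces A's nested i/j index loops (with an explicit max-length bound and repeated indexing into decoded_blocks) by a head-stripping transpose: slice off the first block_size blocks once, then repeatedly emit the heads of the non-empty blocks and recurse on their tails.
import Mathlib
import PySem

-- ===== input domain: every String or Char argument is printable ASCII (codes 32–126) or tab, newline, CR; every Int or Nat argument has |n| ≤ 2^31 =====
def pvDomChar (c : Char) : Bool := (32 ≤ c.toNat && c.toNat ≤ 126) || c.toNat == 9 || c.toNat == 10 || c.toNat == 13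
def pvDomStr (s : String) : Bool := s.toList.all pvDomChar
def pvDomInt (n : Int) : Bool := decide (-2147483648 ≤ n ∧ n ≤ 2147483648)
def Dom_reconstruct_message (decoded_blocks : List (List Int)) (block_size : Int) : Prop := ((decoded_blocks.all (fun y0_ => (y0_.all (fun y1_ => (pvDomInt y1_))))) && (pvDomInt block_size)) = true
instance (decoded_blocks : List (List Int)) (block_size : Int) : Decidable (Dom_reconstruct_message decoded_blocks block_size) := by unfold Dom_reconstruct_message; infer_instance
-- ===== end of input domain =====

-- B replaces A's i/j index arithmetic by a head-stripping column transpose (consume block heads, recurse on tails); objective: alternative (same cost, no index arithmetic).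


-- ===== PORT A =====
def reconstruct_message (decoded_blocks : List (List Int)) (block_size : Int) : String :=
  -- max_block_length = max(len(block) for block in decoded_blocks)  (ValueError on [] is excluded by Pre_)
  let max_block_length : Int :=
    (PySem.List.max? (decoded_blocks.map (fun b => (b.length : Int))) (fun x => x)).getD 0
  (PySem.List.pyRange 0 max_block_length 1).foldl (fun acc i =>
    (PySem.List.pyRange 0 block_size 1).foldl (fun acc j =>
      let blk := PySem.List.pyGetD decoded_blocks j []   -- decoded_blocks[j]; Pre_ keeps j in range
      if i < (blk.length : Int) then acc ++ PySem.Int.toStr (PySem.List.pyGetD blk i 0)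
      else acc) acc) ""

-- ===== PORT B =====
-- the while loop of Source B: emit the heads of the non-empty blocks, recurse on the tails
-- (termination: pv_tail_sum_lt, stated here because the definition cites it)
theorem pv_tail_sum_lt (blocks : List (List Int))
    (h : blocks.any (fun b => !b.isEmpty) = true) :
    ((blocks.map List.tail).map List.length).sum < (blocks.map List.length).sum := by
  simp only [List.any_eq_true, Bool.not_eq_true', List.isEmpty_eq_false_iff] at h
  obtain ⟨b, hb, hbne⟩ := h
  induction blocks with
  | nil => cases hb
  | cons x t ih =>
    simp only [List.map_cons, List.sum_cons]
    rcases List.mem_cons.mp hb with rfl | hmt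
    · have h1 : b.tail.length < b.length := by
        cases b with
        | nil => exact absurd rfl hbne
        | cons a s => simp
      have h2 : ((t.map List.tail).map List.length).sum ≤ (t.map List.length).sum := by
        rw [List.map_map]
        apply List.sum_le_sum
        intro y hy
        simp [List.length_tail]
      omega
    · have h1 : x.tail.length ≤ x.length := by rw [List.length_tail]; omega
      have := ih hmt
      omega

def altLoop (blocks : List (List Int)) : List String :=
  if h : blocks.any (fun b => !b.isEmpty) then
    (blocks.filterMap (fun b => b.head?.map PySem.Int.toStr)) ++ altLoop (blocks.map List.tail)
  else []
termination_by (blocks.map List.length).sum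
decreasing_by
  simpa using pv_tail_sum_lt blocks h

def reconstruct_message_alt (decoded_blocks : List (List Int)) (block_size : Int) : String :=
  let blocks := if block_size > 0 then PySem.List.slice decoded_blocks none (some block_size) else []
  String.join (altLoop blocks)

-- ===== PRECONDITION & SPEC =====
-- Pre_ excludes exactly the inputs where A raises: empty decoded_blocks (ValueError from max),
-- and block_size exceeding the number of blocks while some block is non-empty (IndexError).
def Pre_reconstruct_message (decoded_blocks : List (List Int)) (block_size : Int) : Prop :=
  decoded_blocks ≠ [] ∧ (block_size ≤ (decoded_blocks.length : Int) ∨ ∀ b ∈ decoded_blocks, b = [])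
instance (decoded_blocks : List (List Int)) (block_size : Int) : Decidable (Pre_reconstruct_message decoded_blocks block_size) := by unfold Pre_reconstruct_message; infer_instance

def pvWitness_reconstruct_message : List (List Int) × Int := ([[1, 2], [3]], 2)

def Spec_reconstruct_message (decoded_blocks : List (List Int)) (block_size : Int) (out : String) : Prop := out = reconstruct_message_alt decoded_blocks block_size
instance (decoded_blocks : List (List Int)) (block_size : Int) (out : String) : Decidable (Spec_reconstruct_message decoded_blocks block_size out) := by unfold Spec_reconstruct_message; infer_instance

-- ===== CLAIM (what is proved, stated in full; the proofs are below) =====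
def Claim_equal_reconstruct_message : Prop := ∀ (decoded_blocks : List (List Int)) (block_size : Int), Dom_reconstruct_message decoded_blocks block_size → Pre_reconstruct_message decoded_blocks block_size → Spec_reconstruct_message decoded_blocks block_size (reconstruct_message decoded_blocks block_size)

-- ===== LEMMAS AND PROOFS =====

-- one column of A's output: row i over a fixed block list
def pvRowStr (blocks : List (List Int)) (i : Int) : String :=
  String.join (blocks.map (fun b =>
    if i < (b.length : Int) then PySem.Int.toStr (PySem.List.pyGetD b i 0) else ""))

theorem pv_foldl_str (l : List String) (s : String) :
    l.foldl (· ++ ·) s = s ++ l.foldl (· ++ ·) "" := by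
  induction l generalizing s with
  | nil => simp
  | cons x t ih =>
    simp only [List.foldl_cons]
    rw [ih (s ++ x), ih ("" ++ x)]
    simp [String.append_assoc]

theorem pv_join_cons (a : String) (l : List String) :
    String.join (a :: l) = a ++ String.join l := by
  simp only [String.join, List.foldl_cons]
  rw [pv_foldl_str l ("" ++ a)]
  simp

theorem pv_join_append (l₁ l₂ : List String) :
    String.join (l₁ ++ l₂) = String.join l₁ ++ String.join l₂ := by
  induction l₁ with
  | nil => simp [String.join]
  | cons x t ih => simp only [List.cons_append, pv_join_cons, ih, String.append_assoc]

theorem pv_join_all_empty (l : List String) (h : ∀ s ∈ l, s = "") : String.join l = "" := by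
  induction l with
  | nil => rfl
  | cons x t ih =>
    rw [pv_join_cons, h x (by simp), ih (fun s hs => h s (by simp [hs]))]
    rfl

-- 'acc += f x' loop over a list is acc ++ join of the pieces
theorem pv_foldl_strAppend {α : Type} (l : List α) (f : α → String) (s : String) :
    l.foldl (fun acc x => acc ++ f x) s = s ++ String.join (l.map f) := by
  induction l generalizing s with
  | nil => simp [String.join]
  | cons x t ih => simp only [List.foldl_cons, List.map_cons, pv_join_cons, ih, String.append_assoc]

-- 'if p x: acc += f x' loop is acc ++ join with "" for the skipped entries
theorem pv_foldl_strAppend_if {α : Type} (l : List α) (p : α → Prop) [DecidablePred p]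
    (f : α → String) (s : String) :
    l.foldl (fun acc x => if p x then acc ++ f x else acc) s
      = s ++ String.join (l.map (fun x => if p x then f x else "")) := by
  induction l generalizing s with
  | nil => simp [String.join]
  | cons x t ih =>
    simp only [List.foldl_cons, List.map_cons, pv_join_cons]
    by_cases hp : p x
    · simp only [if_pos hp, ih, String.append_assoc]
    · rw [if_neg hp]
      rw [ih]
      simp [hp]

theorem pv_rowStr_all_empty (blocks : List (List Int)) (i : Int) (h0 : 0 ≤ i)
    (h : ∀ b ∈ blocks, b = []) : pvRowStr blocks i = "" := by
  unfold pvRowStr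
  apply pv_join_all_empty
  intro s hs
  simp only [List.mem_map] at hs
  obtain ⟨b, hb, rfl⟩ := hs
  rw [h b hb, if_neg (by simp only [List.length_nil, Nat.cast_zero]; omega)]

theorem pv_rowStr_succ (blocks : List (List Int)) (k : Nat) :
    pvRowStr blocks ((k : Int) + 1) = pvRowStr (blocks.map List.tail) ((k : Int)) := by
  unfold pvRowStr
  rw [List.map_map]
  congr 1
  apply List.map_congr_left
  intro b _
  cases b with
  | nil =>
    simp only [Function.comp_apply, List.tail_nil, List.length_nil, Nat.cast_zero]
    rw [if_neg (by omega)]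
    rw [if_neg (by omega)]
  | cons x t =>
    simp only [Function.comp, List.tail_cons, List.length_cons]
    have hc : ((k : Int) + 1 < ((t.length + 1 : Nat) : Int)) ↔ ((k : Int) < (t.length : Int)) := by
      push_cast; omega
    have hg : PySem.List.pyGetD (x :: t) ((k : Int) + 1) 0 = PySem.List.pyGetD t (k : Int) 0 := by
      have h1 : ((k : Int) + 1) = (((k + 1 : Nat)) : Int) := by push_cast; ring
      rw [h1, PySem.List.pyGetD_natCast, PySem.List.pyGetD_natCast, List.getD_cons_succ]
    rw [hg]
    push_cast
    by_cases hk : (k : Int) < (t.length : Int)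
    · rw [if_pos (by push_cast; omega), if_pos hk]
    · rw [if_neg (by push_cast; omega), if_neg hk]

theorem pv_rowStr_zero (blocks : List (List Int)) :
    pvRowStr blocks 0
      = String.join (blocks.filterMap (fun b => b.head?.map PySem.Int.toStr)) := by
  unfold pvRowStr
  induction blocks with
  | nil => rfl
  | cons b t ih =>
    cases b with
    | nil => simpa [pv_join_cons] using ih
    | cons x xs =>
      simp only [List.map_cons, List.filterMap_cons, List.head?_cons, Option.map_some,
        pv_join_cons]
      rw [ih]
      congr 1
      rw [if_pos (by simp only [List.length_cons]; push_cast; omega)]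
      congr 1
      have : (0 : Int) = ((0 : Nat) : Int) := rfl
      rw [this, PySem.List.pyGetD_natCast]
      rfl

theorem pv_altLoop_all_empty (blocks : List (List Int)) (h : ∀ b ∈ blocks, b = []) :
    altLoop blocks = [] := by
  rw [altLoop, dif_neg]
  simp only [List.any_eq_true, Bool.not_eq_true', List.isEmpty_eq_false_iff, not_exists]
  intro b hb
  exact hb.2 (h b hb.1)

-- the core transpose equivalence: join of the first m rows = join of the head-stripping loop
theorem pv_rows_eq_altLoop (m : Nat) :
    ∀ blocks : List (List Int), (∀ b ∈ blocks, b.length ≤ m) →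
      String.join ((List.range m).map (fun k : Nat => pvRowStr blocks (k : Int)))
        = String.join (altLoop blocks) := by
  induction m with
  | zero =>
    intro blocks h
    rw [pv_altLoop_all_empty blocks (fun b hb => List.length_eq_zero_iff.mp (Nat.le_zero.mp (h b hb)))]
    rfl
  | succ m ih =>
    intro blocks h
    by_cases hall : ∀ b ∈ blocks, b = []
    · rw [pv_altLoop_all_empty blocks hall]
      apply pv_join_all_empty
      intro s hs
      simp only [List.mem_map] at hs
      obtain ⟨k, _, rfl⟩ := hs
      exact pv_rowStr_all_empty blocks _ (Int.natCast_nonneg k) hall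
    · simp only [List.range_succ_eq_map, List.map_cons, List.map_map, pv_join_cons, Nat.cast_zero]
      have hstep : ((List.range m).map ((fun k : Nat => pvRowStr blocks (k : Int)) ∘ Nat.succ))
          = (List.range m).map (fun k : Nat => pvRowStr (blocks.map List.tail) (k : Int)) := by
        apply List.map_congr_left
        intro k _
        simp only [Function.comp, Nat.succ_eq_add_one]
        have : ((k + 1 : Nat) : Int) = (k : Int) + 1 := by push_cast; ring
        rw [this, pv_rowStr_succ]
      rw [hstep, ih (blocks.map List.tail) (by
        intro b hb
        simp only [List.mem_map] at hb
        obtain ⟨c, hc, rfl⟩ := hb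
        have := h c hc
        rw [List.length_tail]
        omega)]
      conv_rhs => rw [altLoop]
      rw [dif_pos (by
        simp only [List.any_eq_true, Bool.not_eq_true', List.isEmpty_eq_false_iff]
        push_neg at hall
        obtain ⟨b, hb, hbne⟩ := hall
        exact ⟨b, hb, hbne⟩)]
      rw [pv_join_append, pv_rowStr_zero]

theorem pv_foldl_id {α β : Type} (l : List α) (s : β) :
    l.foldl (fun acc _ => acc) s = s := by
  induction l with
  | nil => rfl
  | cons x t ih => simpa using ih

-- A's inner loop (0 < bs ≤ len) is acc ++ one row over the first bs blocks
-- A's inner loop (0 < bs ≤ len) is acc ++ one row over the first bs blocks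
theorem pv_inner_loop (db : List (List Int)) (bs i : Int) (hbs : 0 < bs)
    (hle : bs ≤ (db.length : Int)) (acc : String) :
    (PySem.List.pyRange 0 bs 1).foldl (fun acc j =>
        let blk := PySem.List.pyGetD db j []
        if i < (blk.length : Int) then acc ++ PySem.Int.toStr (PySem.List.pyGetD blk i 0)
        else acc) acc
      = acc ++ pvRowStr (db.take bs.toNat) i := by
  have hlen : (((db.take bs.toNat).length : Nat) : Int) = bs := by
    simp only [List.length_take]
    omega
  have hcongr : (PySem.List.pyRange 0 bs 1).foldl (fun acc j =>
        let blk := PySem.List.pyGetD db j []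
        if i < (blk.length : Int) then acc ++ PySem.Int.toStr (PySem.List.pyGetD blk i 0)
        else acc) acc
      = (PySem.List.pyRange 0 bs 1).foldl (fun acc j =>
        if i < ((PySem.List.pyGetD (db.take bs.toNat) j []).length : Int) then
          acc ++ PySem.Int.toStr (PySem.List.pyGetD (PySem.List.pyGetD (db.take bs.toNat) j []) i 0)
        else acc) acc := by
    apply PySem.List.foldl_congr_mem
    intro a j hj
    rw [PySem.List.mem_pyRange_one] at hj
    have hjg : PySem.List.pyGetD db j [] = PySem.List.pyGetD (db.take bs.toNat) j [] := by
      rw [PySem.List.pyGetD_eq_getElem db [] hj.1 (by omega),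
          PySem.List.pyGetD_eq_getElem (db.take bs.toNat) [] hj.1
            (by rw [hlen]; exact hj.2)]
      rw [List.getElem_take]
    dsimp only
    rw [hjg]
  rw [hcongr]
  rw [show PySem.List.pyRange 0 bs 1 = PySem.List.pyRange 0 (((db.take bs.toNat).length : Nat) : Int) 1 from by rw [hlen]]
  refine Eq.trans (PySem.List.foldl_pyRange_pyGetD' (db.take bs.toNat) []
      (fun acc blk => if i < (blk.length : Int) then
        acc ++ PySem.Int.toStr (PySem.List.pyGetD blk i 0) else acc)
      acc (by omega : (0 : Int) <= 0)) ?_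
  simp only [Int.toNat_zero, List.drop_zero]
  rw [pv_foldl_strAppend_if (db.take bs.toNat) (fun b => i < (b.length : Int))
      (fun b => PySem.Int.toStr (PySem.List.pyGetD b i 0)) acc]
  rfl

-- ===== VERDICT (by name: the statement is the Claim_ definition above) =====
theorem reconstruct_message_spec : Claim_equal_reconstruct_message := by
  intro db bs _ hpre
  obtain ⟨hne, hpre2⟩ := hpre
  unfold Spec_reconstruct_message reconstruct_message reconstruct_message_alt
  -- the max over the (nonempty) list of lengths
  obtain ⟨M, hM⟩ : ∃ M, PySem.List.max? (db.map (fun b => (b.length : Int))) (fun x => x) = some M := by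
    cases hmax : PySem.List.max? (db.map (fun b => (b.length : Int))) (fun x => x) with
    | none =>
      rw [PySem.List.max?_eq_none_iff] at hmax
      simp only [List.map_eq_nil_iff] at hmax
      exact absurd hmax hne
    | some M => exact ⟨M, rfl⟩
  have hMmem : M ∈ db.map (fun b => (b.length : Int)) := PySem.List.max?_mem hM
  have hM0 : 0 ≤ M := by
    simp only [List.mem_map] at hMmem
    obtain ⟨b, _, rfl⟩ := hMmem
    exact Int.natCast_nonneg _
  have hMmax : ∀ b ∈ db, (b.length : Int) ≤ M := by
    intro b hb
    exact PySem.List.max?_isMax hM _ (List.mem_map_of_mem hb)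
  rw [hM]
  simp only [Option.getD_some]
  by_cases hbs : 0 < bs
  · -- block_size > 0: B takes the first bs blocks
    rw [if_pos hbs]
    rw [PySem.List.slice_to db (le_of_lt hbs)]
    rcases hpre2 with hle | hall
    · -- bs ≤ len db : the generic case
      have hinner : ∀ acc i, (PySem.List.pyRange 0 bs 1).foldl (fun acc j =>
            let blk := PySem.List.pyGetD db j []
            if i < (blk.length : Int) then acc ++ PySem.Int.toStr (PySem.List.pyGetD blk i 0)
            else acc) acc = acc ++ pvRowStr (db.take bs.toNat) i := by
        intro acc i
        exact pv_inner_loop db bs i hbs hle acc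
      calc (PySem.List.pyRange 0 M 1).foldl (fun acc i =>
              (PySem.List.pyRange 0 bs 1).foldl (fun acc j =>
                let blk := PySem.List.pyGetD db j []
                if i < (blk.length : Int) then acc ++ PySem.Int.toStr (PySem.List.pyGetD blk i 0)
                else acc) acc) ""
          = (PySem.List.pyRange 0 M 1).foldl
              (fun acc i => acc ++ pvRowStr (db.take bs.toNat) i) "" := by
            apply PySem.List.foldl_congr_mem
            intro acc i _
            exact hinner acc i
        _ = String.join ((List.range M.toNat).map (fun k : Nat => pvRowStr (db.take bs.toNat) (k : Int))) := by
            have : M = ((M.toNat : Nat) : Int) := by omega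
            rw [this, PySem.List.pyRange_zero_natCast, List.foldl_map,
              pv_foldl_strAppend (List.range M.toNat)
                (fun k : Nat => pvRowStr (db.take bs.toNat) (k : Int)) ""]
            have hmx : (max M 0).toNat = M.toNat := by omega
            simp [hmx]
        _ = String.join (altLoop (db.take bs.toNat)) := by
            apply pv_rows_eq_altLoop
            intro b hb
            have := hMmax b (List.mem_of_mem_take hb)
            omega
    · -- all blocks are empty: both sides are the empty string
      have hMz : M = 0 := by
        simp only [List.mem_map] at hMmem
        obtain ⟨b, hb, rfl⟩ := hMmem
        rw [hall b hb]
        rfl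
      rw [hMz, PySem.List.pyRange_one_eq_nil (le_refl 0)]
      simp only [List.foldl_nil]
      rw [pv_altLoop_all_empty (db.take bs.toNat)
        (fun b hb => hall b (List.mem_of_mem_take hb))]
      rfl
  · -- block_size ≤ 0: both sides are the empty string
    rw [if_neg hbs]
    rw [PySem.List.pyRange_one_eq_nil (by omega : bs ≤ 0)]
    simp only [List.foldl_nil]
    rw [pv_foldl_id, pv_altLoop_all_empty [] (by intro b hb; cases hb)]
    rfl
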